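-- pv_equiv track=rewrite | github.com/GAET-embedding/Uncertainty_Study | preprocess/utils.py | collect_common_tk
-- ===== SOURCE A (Python) =====
-- BASEDICT = {
--     '____UNKNOW____': 0,
--     '____PAD____': 1,
--     '____ST____': 2,
--     '____ED____': 3
-- }
--
-- def collect_common_tk(word2index_list):
--     def appear_all(k):
--         for tar_dict in word2index_list:
--             if k not in tar_dict:
--                 return False
--         return True
--
--     common_tk = []
--     word2index = word2index_list[0]
--     for tk in word2index:
--         if tk in BASEDICT:
--             continue
--         if appear_all(tk):
--             common_tk.append(tk)
--     return common_tk
-- ===== SOURCE B (Python) =====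
-- BASEDICT = {
--     '____UNKNOW____': 0,
--     '____PAD____': 1,
--     '____ST____': 2,
--     '____ED____': 3
-- }
--
-- def collect_common_tk(word2index_list):
--     # Precompute the set of keys common to all dicts, then one ordered filtering pass.
--     common = set(word2index_list[0]).intersection(*word2index_list[1:])
--     return [tk for tk in word2index_list[0]
--             if tk not in BASEDICT and tk in common]
-- ===== Notes on version B (the rewrite author's own statement) =====
-- stated objective: idiomatic
-- what changed: B precomputes the intersection of all dicts' key sets once (set.intersection) and then does a single ordered filtering pass over the first dict, instead of A's per-key helper that rescans every dict for each key.
import Mathlib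
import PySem

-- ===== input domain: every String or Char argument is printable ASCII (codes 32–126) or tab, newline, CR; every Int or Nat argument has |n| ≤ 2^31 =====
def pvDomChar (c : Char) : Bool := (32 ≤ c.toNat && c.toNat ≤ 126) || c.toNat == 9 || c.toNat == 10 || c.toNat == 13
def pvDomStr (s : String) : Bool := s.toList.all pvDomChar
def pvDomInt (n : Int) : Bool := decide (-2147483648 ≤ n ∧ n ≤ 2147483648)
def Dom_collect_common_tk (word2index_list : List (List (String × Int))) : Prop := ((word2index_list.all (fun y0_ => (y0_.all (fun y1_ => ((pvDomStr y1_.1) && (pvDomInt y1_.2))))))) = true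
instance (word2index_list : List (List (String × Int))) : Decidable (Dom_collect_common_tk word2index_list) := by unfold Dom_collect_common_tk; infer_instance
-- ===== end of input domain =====

-- B precomputes the common-key set once and filters the first dict's keys in one pass (idiomatic restructuring, same results).


-- ===== PORT A =====
def pvBaseKeys : List String := ["____UNKNOW____", "____PAD____", "____ST____", "____ED____"]

-- A's inner helper `appear_all`: k in every dict of the list (early-return loop = List.all)
def pvAppearAll (word2index_list : List (List (String × Int))) (k : String) : Bool :=
  word2index_list.all (fun tar_dict => (tar_dict.map Prod.fst).contains k)

def collect_common_tk (word2index_list : List (List (String × Int))) : List String :=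
  match word2index_list with
  | [] => []  -- unreachable under Pre_ (Python raises IndexError on word2index_list[0])
  | word2index :: _ =>
    (word2index.map Prod.fst).foldl (fun common_tk tk =>
      if pvBaseKeys.contains tk then common_tk
      else if pvAppearAll word2index_list tk then common_tk ++ [tk]
      else common_tk) []

-- ===== PORT B =====
def collect_common_tk_alt (word2index_list : List (List (String × Int))) : List String :=
  match word2index_list with
  | [] => []  -- unreachable under Pre_ (Python raises IndexError on word2index_list[0])
  | d0 :: rest =>
    let common : PySem.Set String :=
      rest.foldl (fun s d => PySem.Set.inter s (d.map Prod.fst))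
        (PySem.Set.ofList (d0.map Prod.fst))
    (d0.map Prod.fst).filter (fun tk =>
      !(pvBaseKeys.contains tk) && PySem.Set.contains common tk)

-- ===== PRECONDITION & SPEC =====
-- Pre_ excludes only the empty list, on which A raises IndexError (word2index_list[0]).
def Pre_collect_common_tk (word2index_list : List (List (String × Int))) : Prop :=
  word2index_list ≠ []
instance (word2index_list : List (List (String × Int))) : Decidable (Pre_collect_common_tk word2index_list) := by unfold Pre_collect_common_tk; infer_instance

def pvWitness_collect_common_tk : (List (List (String × Int))) := [[("a", 1), ("b", 2)], [("b", 3)]]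

def Spec_collect_common_tk (word2index_list : List (List (String × Int))) (out : List String) : Prop := out = collect_common_tk_alt word2index_list
instance (word2index_list : List (List (String × Int))) (out : List String) : Decidable (Spec_collect_common_tk word2index_list out) := by unfold Spec_collect_common_tk; infer_instance

-- ===== CLAIM (what is proved, stated in full; the proofs are below) =====
def Claim_equal_collect_common_tk : Prop := ∀ (word2index_list : List (List (String × Int))), Dom_collect_common_tk word2index_list → Pre_collect_common_tk word2index_list → Spec_collect_common_tk word2index_list (collect_common_tk word2index_list)

-- ===== LEMMAS AND PROOFS =====

-- A's accumulate-if-loop is a filter (two-branch body folded into one condition).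
theorem pv_foldl_two_if (p q : String → Bool) (xs acc : List String) :
    xs.foldl (fun common_tk tk =>
      if p tk then common_tk
      else if q tk then common_tk ++ [tk]
      else common_tk) acc
    = acc ++ xs.filter (fun tk => !p tk && q tk) := by
  induction xs generalizing acc with
  | nil => simp
  | cons x xs ih =>
    simp only [List.foldl_cons, List.filter_cons]
    by_cases hp : p x <;> by_cases hq : q x <;> simp [hp, hq, ih]

-- membership in B's folded intersection
theorem pv_mem_interFoldl (rest : List (List (String × Int))) (s : PySem.Set String) (k : String) :
    k ∈ rest.foldl (fun s d => PySem.Set.inter s (d.map Prod.fst)) s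
    ↔ k ∈ s ∧ ∀ d ∈ rest, k ∈ d.map Prod.fst := by
  induction rest generalizing s with
  | nil => simp
  | cons d rest ih =>
    simp only [List.foldl_cons, ih, PySem.Set.mem_inter, List.mem_cons]
    constructor
    · rintro ⟨⟨hs, hd⟩, hrest⟩
      exact ⟨hs, fun d' hd' => by rcases hd' with rfl | hd' <;> [exact hd; exact hrest d' hd']⟩
    · rintro ⟨hs, hall⟩
      exact ⟨⟨hs, hall d (Or.inl rfl)⟩, fun d' hd' => hall d' (Or.inr hd')⟩

-- ===== VERDICT (by name: the statement is the Claim_ definition above) =====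
theorem collect_common_tk_spec : Claim_equal_collect_common_tk := by
  intro l _ hpre
  unfold Spec_collect_common_tk
  match l with
  | [] => exact absurd rfl hpre
  | d0 :: rest =>
    simp only [collect_common_tk, collect_common_tk_alt]
    rw [pv_foldl_two_if, List.nil_append]
    apply List.filter_congr
    intro tk htk
    congr 1
    rw [Bool.eq_iff_iff, PySem.Set.contains_iff,
        pv_mem_interFoldl rest (PySem.Set.ofList (d0.map Prod.fst)) tk,
        PySem.Set.mem_ofList]
    simp only [pvAppearAll, List.all_cons, List.all_eq_true, Bool.and_eq_true,
      List.contains_iff_mem]
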